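-- pv_equiv track=rewrite | github.com/davidluzhiyun/COMPSCI260_Introduction_to_Computational_Genomics | PS6/analyze_sequence.py | compute_state_frequencies
-- ===== SOURCE A (Python) =====
-- def compute_state_frequencies(state_sequence, observed_sequence, subsequence):
--     """Given the state and observed sequences, return the state sequences that
--     emitted the query subsequence and frequency in which those state sequences
--     sequences emitted the subsequence.
--
--     Arguments:
--         state_sequence (list of single-char strings): generated state sequence
--         observed_sequence (list of single-char strings): generated observed sequence
--         subsequence (list of single-char strings): the observed subsequence to count
--
--     Returns:
--         a dictionary mapping the state name to the frequency of observing the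
--         provided sequence. Example return:
--         {
--             "WWWW": 2,
--             "WWWS": 1,
--             ...
--         }
--     """
--
--     # Check the types for each of the input arguments
--     if type(state_sequence) is not list:
--         raise TypeError(f"The argument 'state_sequence' must be a list of strings. "
--                         "(received type {type(state_sequence)})")
--     if type(observed_sequence) is not list:
--         raise TypeError(f"The argument 'observed_sequence' must be a list of strings. "
--                         "(received type {type(observed_sequence)})")
--     if type(subsequence) is not list:
--         raise TypeError(f"The argument 'subsequence' must be a list of strings. "
--                         "(received type {type(subsequence)})")
--
--     #
--     # YOUR CODE HERE
--     #
--
--     # method of comparing sequence comes from https://miguendes.me/python-compare-lists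
--     # length of sequence
--     k = len(subsequence)
--     # places to look
--     n = len(state_sequence) - k + 1
--     my_dict = {}
--     for i in range(n):
--         # if found a match
--         if observed_sequence[i:i + k] == subsequence:
--             # states as a string
--             states = "".join(state_sequence[i:i + k])
--             # create new states entry if not in dictionary
--             if my_dict.get(states) is None:
--                 my_dict[states] = 1
--             # else increase frequency
--             else:
--                 my_dict[states] += 1
--     return my_dict
-- ===== SOURCE B (Python) =====
-- def _matches(obs, sub):
--     # does obs start with sub?
--     if len(obs) < len(sub):
--         return False
--     for o, s in zip(obs, sub):
--         if o != s:
--             return False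
--     return True
--
--
-- def compute_state_frequencies(state_sequence, observed_sequence, subsequence):
--     k = len(subsequence)
--     counts = {}
--     st = state_sequence
--     obs = observed_sequence
--     while True:
--         if len(st) >= k and _matches(obs, subsequence):
--             key = "".join(st[:k])
--             counts[key] = counts.get(key, 0) + 1
--         if not st:
--             break
--         st = st[1:]
--         obs = obs[1:]
--     return counts
-- ===== Notes on version B (the rewrite author's own statement) =====
-- stated objective: alternative
-- what changed: A indexes range(len(state)-k+1) and compares a fresh slice observed[i:i+k] against the pattern at each position; B instead walks the two sequences by suffixes (structural recursion dropping one head per step) and uses a short-circuiting element-wise prefix check instead of building and comparing slices.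
import Mathlib
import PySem

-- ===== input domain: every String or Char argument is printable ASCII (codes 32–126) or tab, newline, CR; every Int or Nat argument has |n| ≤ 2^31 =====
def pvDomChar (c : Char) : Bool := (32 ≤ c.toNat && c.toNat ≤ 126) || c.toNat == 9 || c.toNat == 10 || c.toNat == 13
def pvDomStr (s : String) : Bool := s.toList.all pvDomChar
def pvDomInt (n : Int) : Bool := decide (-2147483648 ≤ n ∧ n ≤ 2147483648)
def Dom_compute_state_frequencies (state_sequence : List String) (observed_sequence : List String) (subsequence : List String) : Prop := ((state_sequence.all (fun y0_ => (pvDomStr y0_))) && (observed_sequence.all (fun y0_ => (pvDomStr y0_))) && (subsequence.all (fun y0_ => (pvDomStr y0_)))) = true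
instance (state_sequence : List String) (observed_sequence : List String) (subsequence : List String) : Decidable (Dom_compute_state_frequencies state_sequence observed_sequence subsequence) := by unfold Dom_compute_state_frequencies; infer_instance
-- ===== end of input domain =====

-- B walks the sequences by suffixes with a short-circuiting prefix check instead of A's
-- index loop with slice comparisons; same O(n*k) cost, different structure (alternative).

-- ===== PORT A =====
def compute_state_frequencies (state_sequence : List String) (observed_sequence : List String) (subsequence : List String) : List (String × Int) :=
  let k : Int := subsequence.length
  let n : Int := (state_sequence.length : Int) - k + 1
  let my_dict : PySem.Dict String Int :=
    (PySem.List.pyRange 0 n 1).foldl (fun d i =>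
      if PySem.List.slice observed_sequence (some i) (some (i + k)) == subsequence then
        match d.get? (PySem.Str.join "" (PySem.List.slice state_sequence (some i) (some (i + k)))) with
        | none => d.insert (PySem.Str.join "" (PySem.List.slice state_sequence (some i) (some (i + k)))) 1
        | some _ => d.modify (PySem.Str.join "" (PySem.List.slice state_sequence (some i) (some (i + k)))) 0 (· + 1)
      else d) PySem.Dict.empty
  my_dict.items

-- ===== PORT B =====
-- port of Source B's _matches: length guard then short-circuit scan over the zipped pair
def pvMatches (obs sub : List String) : Bool :=
  if obs.length < sub.length then false
  else (obs.zip sub).all (fun p => p.1 == p.2)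

-- port of Source B's while loop: one recursive step per suffix of state_sequence
def pvGo (k : Nat) (sub : List String) (st obs : List String) (counts : PySem.Dict String Int) : PySem.Dict String Int :=
  let counts' :=
    if decide (k ≤ st.length) && pvMatches obs sub then
      counts.insert (PySem.Str.join "" (st.take k))
        (counts.getD (PySem.Str.join "" (st.take k)) 0 + 1)
    else counts
  match st with
  | [] => counts'
  | _ :: st' => pvGo k sub st' obs.tail counts'

def compute_state_frequencies_alt (state_sequence : List String) (observed_sequence : List String) (subsequence : List String) : List (String × Int) :=
  (pvGo subsequence.length subsequence state_sequence observed_sequence PySem.Dict.empty).items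

-- ===== PRECONDITION & SPEC =====
def Spec_compute_state_frequencies (state_sequence : List String) (observed_sequence : List String) (subsequence : List String) (out : List (String × Int)) : Prop := out = compute_state_frequencies_alt state_sequence observed_sequence subsequence
instance (state_sequence : List String) (observed_sequence : List String) (subsequence : List String) (out : List (String × Int)) : Decidable (Spec_compute_state_frequencies state_sequence observed_sequence subsequence out) := by unfold Spec_compute_state_frequencies; infer_instance

-- ===== CLAIM (what is proved, stated in full; the proofs are below) =====
def Claim_equal_compute_state_frequencies : Prop := ∀ (state_sequence : List String) (observed_sequence : List String) (subsequence : List String), Dom_compute_state_frequencies state_sequence observed_sequence subsequence → Spec_compute_state_frequencies state_sequence observed_sequence subsequence (compute_state_frequencies state_sequence observed_sequence subsequence)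

-- ===== LEMMAS AND PROOFS =====

-- the A-side branch (get? then insert-1 / modify-+1) is exactly B's insert of getD+1
lemma dict_bump (d : PySem.Dict String Int) (key : String) :
    (match d.get? key with
     | none => d.insert key 1
     | some _ => d.modify key 0 (· + 1)) = d.insert key (d.getD key 0 + 1) := by
  cases h : d.get? key with
  | none =>
      simp only [PySem.Dict.getD_eq_get?_getD, h, Option.getD_none]
      rfl
  | some v => rfl

-- B's prefix test is "take sub.length = sub"
lemma pvMatches_iff (sub obs : List String) :
    pvMatches obs sub = true ↔ obs.take sub.length = sub := by
  induction sub generalizing obs with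
  | nil => simp [pvMatches]
  | cons s sub' ih =>
      cases obs with
      | nil => simp [pvMatches]
      | cons o obs' =>
          simp only [pvMatches, List.length_cons]
          by_cases hlen : obs'.length < sub'.length
          · rw [if_pos (by omega)]
            constructor
            · intro h; simp at h
            · intro h
              have := congrArg List.length h
              simp [Nat.min_def] at this
              omega
          · rw [if_neg (by omega)]
            have ih' := ih obs'
            simp only [pvMatches] at ih'
            rw [if_neg hlen] at ih'
            simp only [List.zip_cons_cons, List.all_cons, Bool.and_eq_true, beq_iff_eq,
              List.take_succ_cons, List.cons.injEq]
            rw [ih']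

-- a slice from 0 is a take
lemma slice_zero_take (e : List String) (k : Nat) :
    PySem.List.slice e (some 0) (some (0 + (k : Int))) = e.take k := by
  rw [show ((0 : Int) + (k : Int)) = ((k : Nat) : Int) from by ring]
  rw [show ((0 : Int)) = ((0 : Nat) : Int) from by norm_num]
  rw [PySem.List.slice_natCast]
  simp

-- a slice shifted by one on a cons is the slice on the tail
lemma slice_shift (y : String) (e : List String) (m k : Nat) :
    PySem.List.slice (y :: e) (some (1 + (m : Int))) (some (1 + (m : Int) + (k : Int)))
    = PySem.List.slice e (some (0 + (m : Int))) (some (0 + (m : Int) + (k : Int))) := by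
  rw [show (1 + (m : Int)) = (((1 + m : Nat) : Int)) from by push_cast; ring]
  rw [show (((1 + m : Nat) : Int) + (k : Int)) = (((1 + m + k : Nat) : Int)) from by push_cast; ring]
  rw [show ((0 : Int) + (m : Int)) = ((m : Nat) : Int) from by ring]
  rw [show (((m : Nat) : Int) + (k : Int)) = (((m + k : Nat) : Int)) from by push_cast; ring]
  rw [PySem.List.slice_natCast, PySem.List.slice_natCast]
  have h1 : 1 + m + k - (1 + m) = k := by omega
  have h2 : m + k - m = k := by omega
  rw [h1, h2]
  have hd : (y :: e).drop (1 + m) = e.drop m := by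
    rw [Nat.add_comm 1 m]; rfl
  rw [hd]

lemma slice_shift_tail (e : List String) (m k : Nat) :
    PySem.List.slice e (some (1 + (m : Int))) (some (1 + (m : Int) + (k : Int)))
    = PySem.List.slice e.tail (some (0 + (m : Int))) (some (0 + (m : Int) + (k : Int))) := by
  rw [show (1 + (m : Int)) = (((1 + m : Nat) : Int)) from by push_cast; ring]
  rw [show (((1 + m : Nat) : Int) + (k : Int)) = (((1 + m + k : Nat) : Int)) from by push_cast; ring]
  rw [show ((0 : Int) + (m : Int)) = ((m : Nat) : Int) from by ring]
  rw [show (((m : Nat) : Int) + (k : Int)) = (((m + k : Nat) : Int)) from by push_cast; ring]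
  rw [PySem.List.slice_natCast, PySem.List.slice_natCast]
  have h1 : 1 + m + k - (1 + m) = k := by omega
  have h2 : m + k - m = k := by omega
  rw [h1, h2]
  have hd : e.drop (1 + m) = e.tail.drop m := by
    conv_rhs => rw [← List.drop_one]
    rw [List.drop_drop]
  rw [hd]

-- the loop of A, started on the suffixes (st, obs), equals B's recursion
lemma loop_eq (sub : List String) (st obs : List String) (d : PySem.Dict String Int) :
    (PySem.List.pyRange 0 ((st.length : Int) - (sub.length : Int) + 1) 1).foldl
      (fun d i =>
        if PySem.List.slice obs (some i) (some (i + (sub.length : Int))) == sub then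
          match d.get? (PySem.Str.join "" (PySem.List.slice st (some i) (some (i + (sub.length : Int))))) with
          | none => d.insert (PySem.Str.join "" (PySem.List.slice st (some i) (some (i + (sub.length : Int))))) 1
          | some _ => d.modify (PySem.Str.join "" (PySem.List.slice st (some i) (some (i + (sub.length : Int))))) 0 (· + 1)
        else d) d
    = pvGo sub.length sub st obs d := by
  induction st generalizing obs d with
  | nil =>
      cases sub with
      | nil =>
          rw [show (((([] : List String).length : Int)) - ((([] : List String).length : Int)) + 1) = 0 + 1 from by
            simp]
          rw [PySem.List.pyRange_one_singleton]
          simp only [List.foldl_cons, List.foldl_nil, List.length_nil, Nat.cast_zero]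
          rw [show ((0 : Int) + 0) = (0 : Int) from by norm_num]
          rw [PySem.List.slice_zero_start, PySem.List.slice_zero_start]
          simp [PySem.List.slice_to, pvGo, pvMatches, dict_bump]
      | cons s sub' =>
          rw [PySem.List.pyRange_one_eq_nil (by
            simp only [List.length_nil, List.length_cons]; push_cast; omega)]
          simp [pvGo, pvMatches]
  | cons x st' ih =>
      by_cases hk : sub.length ≤ st'.length + 1
      · -- the range is nonempty: peel index 0, then shift indices by one
        have hn : (0 : Int) < ((x :: st').length : Int) - (sub.length : Int) + 1 := by
          simp only [List.length_cons]; push_cast; omega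
        rw [PySem.List.pyRange_one_cons hn]
        simp only [List.foldl_cons]
        rw [show ((0 : Int) + 1) = 1 from by norm_num]
        -- step at index 0
        have hstep0 :
            (if PySem.List.slice obs (some 0) (some (0 + (sub.length : Int))) == sub then
               match d.get? (PySem.Str.join "" (PySem.List.slice (x :: st') (some 0) (some (0 + (sub.length : Int))))) with
               | none => d.insert (PySem.Str.join "" (PySem.List.slice (x :: st') (some 0) (some (0 + (sub.length : Int))))) 1
               | some _ => d.modify (PySem.Str.join "" (PySem.List.slice (x :: st') (some 0) (some (0 + (sub.length : Int))))) 0 (· + 1)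
             else d)
            = (if decide (sub.length ≤ (x :: st').length) && pvMatches obs sub then
                 d.insert (PySem.Str.join "" ((x :: st').take sub.length))
                   (d.getD (PySem.Str.join "" ((x :: st').take sub.length)) 0 + 1)
               else d) := by
          rw [slice_zero_take obs sub.length, slice_zero_take (x :: st') sub.length]
          have hcond : (obs.take sub.length == sub) = (decide (sub.length ≤ (x :: st').length) && pvMatches obs sub) := by
            have hd : decide (sub.length ≤ (x :: st').length) = true := by
              simp only [List.length_cons]; exact decide_eq_true (by omega)
            rw [hd, Bool.true_and]
            by_cases h : obs.take sub.length = sub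
            · simp [h, (pvMatches_iff sub obs).2 h]
            · have hf : pvMatches obs sub = false := by
                cases hpm : pvMatches obs sub with
                | false => rfl
                | true => exact absurd ((pvMatches_iff sub obs).1 hpm) h
              simp [h, hf]
          rw [hcond]
          split
          · exact dict_bump d _
          · rfl
        rw [hstep0]
        -- shift the remaining range by one
        have hshift :
            ∀ (d' : PySem.Dict String Int),
            (PySem.List.pyRange 1 (((x :: st').length : Int) - (sub.length : Int) + 1) 1).foldl
              (fun d i =>
                if PySem.List.slice obs (some i) (some (i + (sub.length : Int))) == sub then
                  match d.get? (PySem.Str.join "" (PySem.List.slice (x :: st') (some i) (some (i + (sub.length : Int))))) with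
                  | none => d.insert (PySem.Str.join "" (PySem.List.slice (x :: st') (some i) (some (i + (sub.length : Int))))) 1
                  | some _ => d.modify (PySem.Str.join "" (PySem.List.slice (x :: st') (some i) (some (i + (sub.length : Int))))) 0 (· + 1)
                else d) d'
            = (PySem.List.pyRange 0 ((st'.length : Int) - (sub.length : Int) + 1) 1).foldl
              (fun d i =>
                if PySem.List.slice obs.tail (some i) (some (i + (sub.length : Int))) == sub then
                  match d.get? (PySem.Str.join "" (PySem.List.slice st' (some i) (some (i + (sub.length : Int))))) with
                  | none => d.insert (PySem.Str.join "" (PySem.List.slice st' (some i) (some (i + (sub.length : Int))))) 1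
                  | some _ => d.modify (PySem.Str.join "" (PySem.List.slice st' (some i) (some (i + (sub.length : Int))))) 0 (· + 1)
                else d) d' := by
          intro d'
          rw [PySem.List.pyRange_one, PySem.List.pyRange_one]
          have hlen : ((((x :: st').length : Int) - (sub.length : Int) + 1) - 1).toNat
              = (((st'.length : Int) - (sub.length : Int) + 1) - 0).toNat := by
            simp only [List.length_cons]; push_cast; congr 1; ring
          rw [hlen, List.foldl_map, List.foldl_map]
          congr 1
          funext dAcc m
          rw [slice_shift_tail obs m sub.length, slice_shift x st' m sub.length]
        rw [hshift, ih]
        conv_rhs => rw [pvGo]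
      · -- sub longer than x :: st' : both loops do nothing down this whole tail
        have hnil : PySem.List.pyRange 0 (((x :: st').length : Int) - (sub.length : Int) + 1) 1 = [] := by
          apply PySem.List.pyRange_one_eq_nil
          simp only [List.length_cons]; push_cast; omega
        rw [hnil]
        simp only [List.foldl_nil]
        conv_rhs => rw [pvGo]
        have hc : decide (sub.length ≤ (x :: st').length) = false := by
          simp only [List.length_cons]; exact decide_eq_false (by omega)
        simp only [hc, Bool.false_and, Bool.false_eq_true, if_false]
        rw [← ih obs.tail d]
        rw [PySem.List.pyRange_one_eq_nil (by omega), List.foldl_nil]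

-- ===== VERDICT (by name: the statement is the Claim_ definition above) =====
theorem compute_state_frequencies_spec : Claim_equal_compute_state_frequencies := by
  intro st obs sub _
  show compute_state_frequencies st obs sub = compute_state_frequencies_alt st obs sub
  simp only [compute_state_frequencies, compute_state_frequencies_alt]
  rw [loop_eq sub st obs PySem.Dict.empty]
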